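-- pv_equiv track=rewrite | github.com/onetwo1/JS- | zhilian_sojson_v2.py | uns_box
-- ===== SOURCE A (Python) =====
-- def uns_box(arg1):
--     _0x4b082b = [15, 35, 29, 24, 33, 16, 1, 38, 10, 9, 19, 31, 40, 27, 22, 23, 25, 13, 6, 11, 39, 18, 20, 8, 14, 21, 32,
--                  26, 2, 30, 7, 4, 17, 5, 3, 28, 34, 37, 12, 36]
--     _0x4da0dc = ['' for _ in range(40)]
--     _0x12605e = ''
--     for _0x20a7bf in range(len(arg1)):
--         _0x385ee3 = arg1[_0x20a7bf]
--         for index, _0x217721 in enumerate(_0x4b082b):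
--             if _0x217721 == _0x20a7bf + 1:
--                 _0x4da0dc[index] = _0x385ee3
--     return ''.join(_0x4da0dc)
-- ===== SOURCE B (Python) =====
-- def uns_box(arg1):
--     _0x4b082b = [15, 35, 29, 24, 33, 16, 1, 38, 10, 9, 19, 31, 40, 27, 22, 23, 25, 13, 6, 11, 39, 18, 20, 8, 14, 21, 32,
--                  26, 2, 30, 7, 4, 17, 5, 3, 28, 34, 37, 12, 36]
--     return ''.join(arg1[t - 1] if t - 1 < len(arg1) else '' for t in _0x4b082b)
-- ===== Notes on version B (the rewrite author's own statement) =====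
-- stated objective: simpler
-- what changed: B does a single gather pass directly over the fixed permutation table (pulling arg1[t-1] for each table entry), replacing A's scatter that scans the whole table once per input character.
import Mathlib
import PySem

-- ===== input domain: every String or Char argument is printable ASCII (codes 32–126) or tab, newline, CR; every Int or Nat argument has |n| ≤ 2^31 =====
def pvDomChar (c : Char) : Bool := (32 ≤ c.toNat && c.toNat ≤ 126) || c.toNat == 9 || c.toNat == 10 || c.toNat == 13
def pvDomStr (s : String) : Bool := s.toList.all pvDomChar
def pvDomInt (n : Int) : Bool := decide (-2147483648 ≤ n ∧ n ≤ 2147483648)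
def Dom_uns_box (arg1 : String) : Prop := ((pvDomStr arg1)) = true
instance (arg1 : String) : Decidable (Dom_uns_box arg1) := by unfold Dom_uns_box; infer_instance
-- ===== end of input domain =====

-- B replaces A's per-character scatter (inner scan of the table for every input char)
-- by one direct gather pass over the fixed permutation table; objective: simpler.

-- the fixed permutation table _0x4b082b (a permutation of 1..40)
def pvTable : List Nat := [15, 35, 29, 24, 33, 16, 1, 38, 10, 9, 19, 31, 40, 27, 22, 23, 25, 13, 6, 11, 39, 18, 20, 8, 14, 21, 32,
                 26, 2, 30, 7, 4, 17, 5, 3, 28, 34, 37, 12, 36]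

-- ===== PORT A =====
-- for each i in range(len), set every slot j with table[j] == i+1 to arg1[i];
-- the inner 'for index, v in enumerate(table): if v == i+1: acc[index] = c' is the
-- pointwise pass over (acc, table) pairs; arg1[i] is always in range (i < len).
def uns_box (arg1 : String) : String :=
  let cs := arg1.toList
  let init : List String := List.replicate 40 ""
  let fin := (List.range cs.length).foldl
    (fun acc i =>
      let c := cs.getD i ' '   -- index always in range here
      ((acc.zip pvTable).map (fun p => if p.2 = i + 1 then String.ofList [c] else p.1)))
    init
  String.join fin

-- ===== PORT B =====
-- ''.join(arg1[t-1] if t-1 < len(arg1) else '' for t in table)  (t ≥ 1, so t-1 is exact on Nat)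
def uns_box_alt (arg1 : String) : String :=
  let cs := arg1.toList
  String.join (pvTable.map (fun t => if t - 1 < cs.length then String.ofList [cs.getD (t - 1) ' '] else ""))

-- ===== PRECONDITION & SPEC =====
def Spec_uns_box (arg1 : String) (out : String) : Prop := out = uns_box_alt arg1
instance (arg1 : String) (out : String) : Decidable (Spec_uns_box arg1 out) := by unfold Spec_uns_box; infer_instance

-- ===== CLAIM (what is proved, stated in full; the proofs are below) =====
def Claim_equal_uns_box : Prop := ∀ (arg1 : String), Dom_uns_box arg1 → Spec_uns_box arg1 (uns_box arg1)

-- ===== LEMMAS AND PROOFS =====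

-- one scatter step over (l.map g, l) pairs is a map over l
theorem pv_zip_map_step {α : Type} (l : List Nat) (g : Nat → α) (i : Nat) (c : α) :
    ((l.map g).zip l).map (fun q => if q.2 = i + 1 then c else q.1)
      = l.map (fun t => if t = i + 1 then c else g t) := by
  induction l with
  | nil => rfl
  | cons h t ih => simp only [List.map_cons, List.zip_cons_cons, ih]

-- invariant: after folding over range m, slot j holds cs[table[j]-1] iff table[j] ≤ m
theorem pv_fold_inv (cs : List Char) (m : Nat) :
    (List.range m).foldl
      (fun acc i =>
        let c := cs.getD i ' '
        ((acc.zip pvTable).map (fun p => if p.2 = i + 1 then String.ofList [c] else p.1)))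
      (List.replicate 40 "")
    = pvTable.map (fun t => if t ≤ m then String.ofList [cs.getD (t - 1) ' '] else "") := by
  induction m with
  | zero =>
      simp only [List.range_zero, List.foldl_nil]
      have h1 : ∀ t ∈ pvTable, 1 ≤ t := by decide
      rw [List.map_congr_left (f := fun t => if t ≤ 0 then String.ofList [cs.getD (t - 1) ' '] else "")
          (g := fun _ => "") ?_]
      · decide
      · intro t ht
        have := h1 t ht
        simp [Nat.not_le.mpr (by omega : 0 < t)]
  | succ n ih =>
      rw [List.range_succ, List.foldl_append, List.foldl_cons, List.foldl_nil, ih]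
      simp only
      rw [pv_zip_map_step pvTable _ n (String.ofList [cs.getD n ' '])]
      apply List.map_congr_left
      intro t ht
      have h1 : ∀ t ∈ pvTable, 1 ≤ t := by decide
      have ht1 := h1 t ht
      by_cases he : t = n + 1
      · subst he; simp
      · rw [if_neg he]
        by_cases hle : t ≤ n
        · rw [if_pos hle, if_pos (by omega)]
        · rw [if_neg hle, if_neg (by omega)]

-- ===== VERDICT (by name: the statement is the Claim_ definition above) =====
theorem uns_box_spec : Claim_equal_uns_box := by
  intro arg1 _
  unfold Spec_uns_box uns_box uns_box_alt
  simp only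
  rw [pv_fold_inv arg1.toList arg1.toList.length]
  refine congrArg String.join (List.map_congr_left ?_)
  intro t ht
  have h1 : ∀ t ∈ pvTable, 1 ≤ t := by decide
  have := h1 t ht
  by_cases h : t ≤ arg1.toList.length
  · rw [if_pos h, if_pos (by omega)]
  · rw [if_neg h, if_neg (by omega)]
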